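-- pv_equiv track=rewrite | github.com/anapenedos/mind-your-Ps | modelling_substitutions.py | nucleotide_match
-- ===== SOURCE A (Python) =====
-- permissive_matches = {
--         # Adenine
--         'A': {'A', 'D', 'H', 'M', 'N', 'R', 'V', 'W'},
--         # Cytosine
--         'C': {'B', 'C', 'H', 'M', 'N', 'S', 'V', 'Y'},
--         # Guanine
--         'G': {'B', 'D', 'G', 'K', 'N', 'R', 'S', 'V'},
--         # Thymine
--         'T': {'B', 'D', 'H', 'K', 'N', 'T', 'W', 'Y'},
--         # A or G
--         'R': {'A', 'B', 'D', 'G', 'H', 'K', 'M', 'N', 'R', 'S', 'V', 'W'},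
--         # C or T
--         'Y': {'B', 'C', 'D', 'H', 'K', 'M', 'N', 'S', 'T', 'V', 'W', 'Y'},
--         # G or C
--         'S': {'B', 'C', 'D', 'G', 'H', 'K', 'M', 'N', 'R', 'S', 'V', 'Y'},
--         # A or T
--         'W': {'A', 'B', 'D', 'H', 'K', 'M', 'N', 'R', 'T', 'V', 'W', 'Y'},
--         # G or T
--         'K': {'B', 'D', 'G', 'H', 'K', 'N', 'R', 'S', 'T', 'V', 'W', 'Y'},
--         # A or C
--         'M': {'A', 'B', 'C', 'D', 'H', 'M', 'N', 'R', 'S', 'V', 'W', 'Y'},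
--         # C or G or T
--         'B': {'B', 'C', 'D', 'G', 'H', 'K', 'M', 'N', 'R', 'S', 'T', 'V', 'W',
--               'Y'},
--         # A or G or T
--         'D': {'A', 'B', 'D', 'G', 'H', 'K', 'M', 'N', 'R', 'S', 'T', 'V', 'W',
--               'Y'},
--         # A or C or T
--         'H': {'A', 'B', 'C', 'D', 'H', 'K', 'M', 'N', 'R', 'S', 'T', 'V', 'W',
--               'Y'},
--         # A or C or G
--         'V': {'A', 'B', 'C', 'D', 'G', 'H', 'K', 'M', 'N', 'R', 'S', 'V', 'W',
--               'Y'},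
--         # A or C or G or T
--         'N': {'A', 'B', 'C', 'D', 'G', 'H', 'K', 'M', 'N', 'R', 'S', 'T', 'V',
--               'W', 'Y'},
-- }
--
-- def nucleotide_match(base1, base2, partial_matches_allowed=True):
--     """
--     Compares two bases and returns True if there is a match and False
--     otherwise.
--
--     Parameters
--     ----------
--     base1, base2 : str
--         A string of len 1 representing a nucleotide.
--     partial_matches_allowed : bool
--         True if, for example, R and A or G (and vice-versa) should be
--         considered a match, False if not.
--
--     Returns
--     -------
--     bool
--         True if:
--         * identical strs
--         * partial_matches_allowed and base1 and base2 are a permitted match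
--         False if:
--         * different bases and base2 is not in the permitted matches for base1
--     """
--     base1_upper = base1.upper()
--     base2_upper = base2.upper()
--     for base in [base1_upper, base2_upper]:
--         if base not in [*permissive_matches.keys(), '-']:
--             raise ValueError(f'base ({base}) character not known IUPAC symbol')
--     return (base1_upper == base2_upper or
--             (partial_matches_allowed and
--              base2_upper in permissive_matches.get(base1_upper, set())))
-- ===== SOURCE B (Python) =====
-- # B: derive compatibility on the fly as non-empty intersection of expansion sets
-- EXPANSION = {
--     'A': {'A'}, 'C': {'C'}, 'G': {'G'}, 'T': {'T'},
--     'R': {'A', 'G'}, 'Y': {'C', 'T'}, 'S': {'C', 'G'}, 'W': {'A', 'T'},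
--     'K': {'G', 'T'}, 'M': {'A', 'C'},
--     'B': {'C', 'G', 'T'}, 'D': {'A', 'G', 'T'}, 'H': {'A', 'C', 'T'},
--     'V': {'A', 'C', 'G'}, 'N': {'A', 'C', 'G', 'T'},
--     '-': set(),
-- }
--
-- def nucleotide_match(base1, base2, partial_matches_allowed=True):
--     b1 = base1.upper()
--     b2 = base2.upper()
--     for b in (b1, b2):
--         if b not in EXPANSION:
--             raise ValueError(f'base ({b}) character not known IUPAC symbol')
--     if b1 == b2:
--         return True
--     return partial_matches_allowed and bool(EXPANSION[b1] & EXPANSION[b2])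
-- ===== Notes on version B (the rewrite author's own statement) =====
-- stated objective: simpler
-- what changed: B replaces A's hand-written 15-entry pairwise compatibility table by a small per-code expansion mapping (IUPAC code -> concrete nucleotides, '-' -> empty set) and decides a partial match as non-empty intersection of the two expansion sets; the identity check stays separate so partial_matches_allowed=False is unchanged.
import Mathlib
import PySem

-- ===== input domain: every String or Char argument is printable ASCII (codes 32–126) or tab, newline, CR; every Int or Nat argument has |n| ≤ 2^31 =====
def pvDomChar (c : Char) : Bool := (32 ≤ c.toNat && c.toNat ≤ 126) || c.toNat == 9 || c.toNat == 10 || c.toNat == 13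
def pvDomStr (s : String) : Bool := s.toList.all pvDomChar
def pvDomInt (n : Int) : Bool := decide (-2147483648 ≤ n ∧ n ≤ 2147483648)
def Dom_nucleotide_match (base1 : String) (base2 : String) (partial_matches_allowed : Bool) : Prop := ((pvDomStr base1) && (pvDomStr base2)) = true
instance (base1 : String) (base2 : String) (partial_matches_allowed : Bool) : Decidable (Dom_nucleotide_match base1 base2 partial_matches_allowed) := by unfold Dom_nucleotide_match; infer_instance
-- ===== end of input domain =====

-- B replaces A's hand-written 15x(8..15) compatibility table by on-the-fly intersection of
-- per-code expansion sets (simpler data); return value proved equal on all valid IUPAC inputs.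

-- ===== PORT A =====
def pvPermissiveMatches : PySem.Dict String (PySem.Set String) := PySem.Dict.ofList
  [ ("A", PySem.Set.ofList ["A","D","H","M","N","R","V","W"]),
    ("C", PySem.Set.ofList ["B","C","H","M","N","S","V","Y"]),
    ("G", PySem.Set.ofList ["B","D","G","K","N","R","S","V"]),
    ("T", PySem.Set.ofList ["B","D","H","K","N","T","W","Y"]),
    ("R", PySem.Set.ofList ["A","B","D","G","H","K","M","N","R","S","V","W"]),
    ("Y", PySem.Set.ofList ["B","C","D","H","K","M","N","S","T","V","W","Y"]),
    ("S", PySem.Set.ofList ["B","C","D","G","H","K","M","N","R","S","V","Y"]),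
    ("W", PySem.Set.ofList ["A","B","D","H","K","M","N","R","T","V","W","Y"]),
    ("K", PySem.Set.ofList ["B","D","G","H","K","N","R","S","T","V","W","Y"]),
    ("M", PySem.Set.ofList ["A","B","C","D","H","M","N","R","S","V","W","Y"]),
    ("B", PySem.Set.ofList ["B","C","D","G","H","K","M","N","R","S","T","V","W","Y"]),
    ("D", PySem.Set.ofList ["A","B","D","G","H","K","M","N","R","S","T","V","W","Y"]),
    ("H", PySem.Set.ofList ["A","B","C","D","H","K","M","N","R","S","T","V","W","Y"]),
    ("V", PySem.Set.ofList ["A","B","C","D","G","H","K","M","N","R","S","V","W","Y"]),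
    ("N", PySem.Set.ofList ["A","B","C","D","G","H","K","M","N","R","S","T","V","W","Y"]) ]

-- the final return expression of A on the uppercased bases (the ValueError branch is excluded by Pre_)
def pvCoreA (b1 b2 : String) (partial_matches_allowed : Bool) : Bool :=
  b1 == b2 ||
    (partial_matches_allowed &&
      PySem.Set.contains (PySem.Dict.getD pvPermissiveMatches b1 PySem.Set.empty) b2)

def nucleotide_match (base1 : String) (base2 : String) (partial_matches_allowed : Bool) : Bool :=
  pvCoreA (PySem.Str.upper base1) (PySem.Str.upper base2) partial_matches_allowed

-- ===== PORT B =====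
def pvExpansion : PySem.Dict String (PySem.Set String) := PySem.Dict.ofList
  [ ("A", PySem.Set.ofList ["A"]), ("C", PySem.Set.ofList ["C"]),
    ("G", PySem.Set.ofList ["G"]), ("T", PySem.Set.ofList ["T"]),
    ("R", PySem.Set.ofList ["A","G"]), ("Y", PySem.Set.ofList ["C","T"]),
    ("S", PySem.Set.ofList ["C","G"]), ("W", PySem.Set.ofList ["A","T"]),
    ("K", PySem.Set.ofList ["G","T"]), ("M", PySem.Set.ofList ["A","C"]),
    ("B", PySem.Set.ofList ["C","G","T"]), ("D", PySem.Set.ofList ["A","G","T"]),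
    ("H", PySem.Set.ofList ["A","C","T"]), ("V", PySem.Set.ofList ["A","C","G"]),
    ("N", PySem.Set.ofList ["A","C","G","T"]), ("-", PySem.Set.empty) ]

-- B after its validation loop (excluded by Pre_): identical → True, else intersection non-empty
def pvCoreB (b1 b2 : String) (partial_matches_allowed : Bool) : Bool :=
  if b1 == b2 then true
  else
    partial_matches_allowed &&
      !(PySem.Set.inter (PySem.Dict.getD pvExpansion b1 PySem.Set.empty)
          (PySem.Dict.getD pvExpansion b2 PySem.Set.empty)).isEmpty

def nucleotide_match_alt (base1 : String) (base2 : String) (partial_matches_allowed : Bool) : Bool :=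
  pvCoreB (PySem.Str.upper base1) (PySem.Str.upper base2) partial_matches_allowed

-- ===== PRECONDITION & SPEC =====
def pvIUPAC : List String := ["A","C","G","T","R","Y","S","W","K","M","B","D","H","V","N","-"]

-- Pre_ excludes exactly the inputs on which A raises ValueError (an uppercased base not an IUPAC code or '-')
def Pre_nucleotide_match (base1 : String) (base2 : String) (partial_matches_allowed : Bool) : Prop :=
  PySem.Str.upper base1 ∈ pvIUPAC ∧ PySem.Str.upper base2 ∈ pvIUPAC
instance (base1 : String) (base2 : String) (partial_matches_allowed : Bool) : Decidable (Pre_nucleotide_match base1 base2 partial_matches_allowed) := by unfold Pre_nucleotide_match; infer_instance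

def pvWitness_nucleotide_match : String × String × Bool := ("r", "A", true)

def Spec_nucleotide_match (base1 : String) (base2 : String) (partial_matches_allowed : Bool) (out : Bool) : Prop := out = nucleotide_match_alt base1 base2 partial_matches_allowed
instance (base1 : String) (base2 : String) (partial_matches_allowed : Bool) (out : Bool) : Decidable (Spec_nucleotide_match base1 base2 partial_matches_allowed out) := by unfold Spec_nucleotide_match; infer_instance

-- ===== CLAIM (what is proved, stated in full; the proofs are below) =====
def Claim_equal_nucleotide_match : Prop := ∀ (base1 : String) (base2 : String) (partial_matches_allowed : Bool), Dom_nucleotide_match base1 base2 partial_matches_allowed → Pre_nucleotide_match base1 base2 partial_matches_allowed → Spec_nucleotide_match base1 base2 partial_matches_allowed (nucleotide_match base1 base2 partial_matches_allowed)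

-- ===== LEMMAS AND PROOFS =====
-- the two cores agree on every pair of valid IUPAC codes: a 16×16×2 finite check
theorem pvCore_eq : ∀ b1 ∈ pvIUPAC, ∀ b2 ∈ pvIUPAC, ∀ p : Bool, pvCoreA b1 b2 p = pvCoreB b1 b2 p := by
  decide

-- ===== VERDICT (by name: the statement is the Claim_ definition above) =====
theorem nucleotide_match_spec : Claim_equal_nucleotide_match := by
  intro base1 base2 p _ hpre
  unfold Spec_nucleotide_match nucleotide_match nucleotide_match_alt
  exact pvCore_eq _ hpre.1 _ hpre.2 p
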